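-- pv_equiv track=rewrite | github.com/bjarkemoensted/adventofcode | 2016/solution02.py | _valid_coord
-- ===== SOURCE A (Python) =====
-- def _valid_coord(keypad, coord):
--     i, j = coord
--     if any(c < 0 for c in coord):
--         return False
--     try:
--         val = keypad[i][j]
--         return val is not None
--     except IndexError:
--         return False
-- ===== SOURCE B (Python) =====
-- def _valid_coord(keypad, coord):
--     # Enumerate the keypad once into the set of non-None cell coordinates,
--     # then answer by set membership.
--     valid = {(i, j)
--              for i, row in enumerate(keypad)
--              for j, v in enumerate(row)
--              if v is not None}
--     return tuple(coord) in valid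
-- ===== Notes on version B (the rewrite author's own statement) =====
-- stated objective: alternative
-- what changed: Instead of guarding/indexing into the keypad (negative guard plus try/except IndexError), B enumerates the keypad once into the set of coordinates of non-None cells and answers by set membership.
import Mathlib
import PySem

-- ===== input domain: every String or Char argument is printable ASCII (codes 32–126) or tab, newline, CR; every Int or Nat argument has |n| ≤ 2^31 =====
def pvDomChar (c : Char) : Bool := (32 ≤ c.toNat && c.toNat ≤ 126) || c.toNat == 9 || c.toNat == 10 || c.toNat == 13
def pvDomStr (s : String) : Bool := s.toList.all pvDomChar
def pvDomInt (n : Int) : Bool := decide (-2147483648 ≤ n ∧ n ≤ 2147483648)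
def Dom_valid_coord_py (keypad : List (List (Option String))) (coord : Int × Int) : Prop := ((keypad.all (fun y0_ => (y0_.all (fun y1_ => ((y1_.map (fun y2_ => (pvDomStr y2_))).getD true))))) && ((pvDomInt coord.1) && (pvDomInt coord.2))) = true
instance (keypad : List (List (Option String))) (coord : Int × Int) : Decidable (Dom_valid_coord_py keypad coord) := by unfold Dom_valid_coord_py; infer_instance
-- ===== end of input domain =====

-- ===== PORT A =====
-- A: EAFP — negative guard, then index and catch IndexError (pyGet? none = IndexError).
def valid_coord_py (keypad : List (List (Option String))) (coord : Int × Int) : Bool :=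
  let i := coord.1
  let j := coord.2
  if i < 0 || j < 0 then false
  else
    match PySem.List.pyGet? keypad i with
    | none => false
    | some row =>
      match PySem.List.pyGet? row j with
      | none => false
      | some v => v.isSome

-- ===== PORT B =====
-- B: enumerate the keypad once into the set of coordinates of non-None cells, answer by membership.
def valid_coord_py_alt (keypad : List (List (Option String))) (coord : Int × Int) : Bool :=
  let valid : PySem.Set (Int × Int) :=
    PySem.Set.ofList
      ((PySem.List.enumerate keypad).flatMap (fun p =>
        (PySem.List.enumerate p.2).filterMap (fun q =>
          if q.2.isSome then some (p.1, q.1) else none)))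
  PySem.Set.contains valid coord

-- ===== PRECONDITION & SPEC =====
def Spec_valid_coord_py (keypad : List (List (Option String))) (coord : Int × Int) (out : Bool) : Prop := out = valid_coord_py_alt keypad coord
instance (keypad : List (List (Option String))) (coord : Int × Int) (out : Bool) : Decidable (Spec_valid_coord_py keypad coord out) := by unfold Spec_valid_coord_py; infer_instance

-- ===== CLAIM (what is proved, stated in full; the proofs are below) =====
def Claim_equal_valid_coord_py : Prop := ∀ (keypad : List (List (Option String))) (coord : Int × Int), Dom_valid_coord_py keypad coord → Spec_valid_coord_py keypad coord (valid_coord_py keypad coord)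

-- ===== LEMMAS AND PROOFS =====

-- membership in B's enumerated coordinate list characterised by indexing
lemma mem_valid_list (keypad : List (List (Option String))) (i j : Int) :
    (i, j) ∈ (PySem.List.enumerate keypad).flatMap (fun p =>
        (PySem.List.enumerate p.2).filterMap (fun q =>
          if q.2.isSome then some (p.1, q.1) else none)) ↔
    ∃ (r : Nat) (hr : r < keypad.length) (c : Nat) (hc : c < keypad[r].length),
      i = (r : Int) ∧ j = (c : Int) ∧ (keypad[r][c]).isSome := by
  simp only [List.mem_flatMap, List.mem_filterMap, PySem.List.mem_enumerate_iff]
  constructor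
  · rintro ⟨p, ⟨r, hr, rfl⟩, q, ⟨c, hc, rfl⟩, hq⟩
    simp only [zero_add] at *
    split_ifs at hq with h
    · cases hq; exact ⟨r, hr, c, hc, rfl, rfl, h⟩
  · rintro ⟨r, hr, c, hc, rfl, rfl, h⟩
    refine ⟨((r : Int), keypad[r]), ⟨r, hr, by simp⟩, ((c : Int), keypad[r][c]), ⟨c, hc, by simp⟩, ?_⟩
    simp [h]

-- ===== VERDICT (by name: the statement is the Claim_ definition above) =====
theorem valid_coord_py_spec : Claim_equal_valid_coord_py := by
  intro keypad coord _
  unfold Spec_valid_coord_py valid_coord_py valid_coord_py_alt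
  obtain ⟨i, j⟩ := coord
  simp only [PySem.Set.contains]
  rw [Bool.eq_iff_iff, List.contains_iff_mem, PySem.Set.mem_ofList, mem_valid_list]
  by_cases hi : i < 0
  · simp only [hi, decide_true, Bool.true_or, if_true, Bool.false_eq_true, false_iff]
    rintro ⟨r, hr, c, hc, rfl, rfl, h⟩
    omega
  · by_cases hj : j < 0
    · simp only [hj, decide_true, Bool.or_true, if_true, Bool.false_eq_true, false_iff]
      rintro ⟨r, hr, c, hc, rfl, rfl, h⟩
      omega
    · rw [not_lt] at hi hj
      rw [if_neg (by simp; omega), PySem.List.pyGet?_of_nonneg (h := hi)]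
      rcases hrow : keypad[i.toNat]? with _ | row
      · rw [List.getElem?_eq_none_iff] at hrow
        simp only [Bool.false_eq_true, false_iff]
        rintro ⟨r, hr, c, hc, rfl, rfl, h⟩
        omega
      · rw [List.getElem?_eq_some_iff] at hrow
        obtain ⟨hilt, hrow⟩ := hrow
        simp only []
        rw [PySem.List.pyGet?_of_nonneg (h := hj)]
        rcases hcell : row[j.toNat]? with _ | v
        · rw [List.getElem?_eq_none_iff] at hcell
          simp only [Bool.false_eq_true, false_iff]
          rintro ⟨r, hr, c, hc, hri, hcj, h⟩
          have hr' : r = i.toNat := by omega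
          subst hr'
          have hc' : c = j.toNat := by omega
          subst hc'
          rw [← hrow] at hcell; omega
        · rw [List.getElem?_eq_some_iff] at hcell
          obtain ⟨hjlt, hcell⟩ := hcell
          simp only []
          constructor
          · intro hv
            refine ⟨i.toNat, hilt, j.toNat, by rw [hrow]; exact hjlt, by omega, by omega, ?_⟩
            simp only [hrow, hcell]; exact hv
          · rintro ⟨r, hr, c, hc, hri, hcj, h⟩
            have hr' : r = i.toNat := by omega
            subst hr'
            have hc' : c = j.toNat := by omega
            subst hc'
            simp only [hrow, hcell] at h; exact h

-- B replaces A's guard-and-index with enumerating the non-None cells once and testing set membership (alternative algorithm).
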